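-- pv_equiv track=rewrite | github.com/MaximilienLeClei/nevo | nets/dynamic/spatial.py | compute_nb_input_spaces_and_d_input
-- ===== SOURCE A (Python) =====
-- def compute_nb_input_spaces_and_d_input(x):
--
--     total = 0
--     nb_input_spaces = 0
--
--     found = False
--
--     d_input = [1, 1]
--
--     while not found:
--
--         if nb_input_spaces > 0:
--
--             if nb_input_spaces % 2 == 0:
--                 d_input[1] *= 2
--             else:  # nb_input_spaces % 2 == 1:
--                 d_input[0] *= 2
--
--         total += 2**nb_input_spaces
--
--         nb_input_spaces += 1
--
--         if len(x) == total:
--             found = True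
--
--     return nb_input_spaces, d_input
-- ===== SOURCE B (Python) =====
-- def compute_nb_input_spaces_and_d_input(x):
--     # len(x) must be 2**n - 1 (the original loops forever otherwise);
--     # recover n directly from the binary length of len(x) + 1.
--     n = (len(x) + 1).bit_length() - 1
--     return n, [2 ** (n // 2), 2 ** ((n - 1) // 2)]
-- ===== Notes on version B (the rewrite author's own statement) =====
-- stated objective: simpler
-- what changed: B has no loop at all: it recovers n in closed form as (len(x)+1).bit_length()-1 and builds d_input as [2**(n//2), 2**((n-1)//2)], replacing A's accumulate-powers-until-match loop with interleaved doubling; Pre_ restricts to lengths 2**n-1 (n>=1), the only inputs on which A terminates.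
import Mathlib
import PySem

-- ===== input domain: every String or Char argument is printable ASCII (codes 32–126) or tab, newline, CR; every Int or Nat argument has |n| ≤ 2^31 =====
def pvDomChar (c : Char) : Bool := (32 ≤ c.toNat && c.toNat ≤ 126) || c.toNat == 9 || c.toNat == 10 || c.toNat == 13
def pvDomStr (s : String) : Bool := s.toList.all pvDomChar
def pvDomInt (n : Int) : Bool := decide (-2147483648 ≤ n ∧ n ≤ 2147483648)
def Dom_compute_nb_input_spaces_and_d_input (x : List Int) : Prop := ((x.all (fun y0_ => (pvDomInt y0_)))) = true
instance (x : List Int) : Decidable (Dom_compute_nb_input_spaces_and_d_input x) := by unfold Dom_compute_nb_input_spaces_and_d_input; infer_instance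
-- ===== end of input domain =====

-- B replaces A's accumulate-until-match loop (with interleaved alternate doubling of
-- d_input) by a loop-free closed form: n = bit_length(len+1) - 1, d_input = [2^(n/2),
-- 2^((n-1)/2)] (objective: simpler). A terminates only when len(x) = 2^n - 1 for some
-- n ≥ 1 (it loops forever otherwise, including len 0); Pre_ is exactly that set of
-- inputs, so A's port uses fuel x.length + 1, which suffices on all of Pre_.

-- ===== PORT A =====
-- loop state: total, counter k, d0, d1; len is x.length
def pvGoA : Nat → Nat → Nat → Nat → Nat → Nat → Int × List Int
  | 0, _, k, d0, d1, _ => ((k : Int), [(d0 : Int), (d1 : Int)])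
  | fuel+1, total, k, d0, d1, len =>
    let d0' := if 0 < k ∧ k % 2 ≠ 0 then d0 * 2 else d0
    let d1' := if 0 < k ∧ k % 2 = 0 then d1 * 2 else d1
    let total' := total + 2 ^ k
    let k' := k + 1
    if len = total' then ((k' : Int), [(d0' : Int), (d1' : Int)])
    else pvGoA fuel total' k' d0' d1' len

def compute_nb_input_spaces_and_d_input (x : List Int) : Int × List Int :=
  pvGoA (x.length + 1) 0 0 1 1 x.length

-- ===== PORT B =====
-- (len(x)+1).bit_length() - 1 is Nat.log2 (x.length + 1); no loop, purely closed form
def compute_nb_input_spaces_and_d_input_alt (x : List Int) : Int × List Int :=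
  let n := Nat.log2 (x.length + 1)
  ((n : Int), [((2 ^ (n / 2) : Nat) : Int), ((2 ^ ((n - 1) / 2) : Nat) : Int)])

-- ===== PRECONDITION & SPEC =====
-- Pre_: x.length = 2^n - 1 for some n ≥ 1 — exactly the inputs on which Python A
-- terminates (on any other length, including 0, A's while-loop never ends).
def Pre_compute_nb_input_spaces_and_d_input (x : List Int) : Prop :=
  x ≠ [] ∧ x.length + 1 = 2 ^ Nat.log2 (x.length + 1)
instance (x : List Int) : Decidable (Pre_compute_nb_input_spaces_and_d_input x) := by
  unfold Pre_compute_nb_input_spaces_and_d_input; infer_instance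

def pvWitness_compute_nb_input_spaces_and_d_input : List Int := [0, 0, 0]

def Spec_compute_nb_input_spaces_and_d_input (x : List Int) (out : Int × List Int) : Prop := out = compute_nb_input_spaces_and_d_input_alt x
instance (x : List Int) (out : Int × List Int) : Decidable (Spec_compute_nb_input_spaces_and_d_input x out) := by unfold Spec_compute_nb_input_spaces_and_d_input; infer_instance

-- ===== CLAIM (what is proved, stated in full; the proofs are below) =====
def Claim_equal_compute_nb_input_spaces_and_d_input : Prop := ∀ (x : List Int), Dom_compute_nb_input_spaces_and_d_input x → Pre_compute_nb_input_spaces_and_d_input x → Spec_compute_nb_input_spaces_and_d_input x (compute_nb_input_spaces_and_d_input x)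

-- ===== LEMMAS AND PROOFS =====

-- invariant: at step k the loop has total = 2^k - 1, d0 = 2^(k/2), d1 = 2^((k-1)/2);
-- if len = 2^n - 1 with k < n ≤ k + fuel, the loop stops exactly at counter n with
-- the closed-form pair.
theorem pvGoA_closedForm (fuel : Nat) : ∀ (k n : Nat), k < n → n ≤ k + fuel →
    pvGoA fuel (2 ^ k - 1) k (2 ^ (k / 2)) (2 ^ ((k - 1) / 2)) (2 ^ n - 1) =
      ((n : Int), [((2 ^ (n / 2) : Nat) : Int), ((2 ^ ((n - 1) / 2) : Nat) : Int)]) := by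
  induction fuel with
  | zero => intro k n h1 h2; omega
  | succ fuel ih =>
    intro k n h1 h2
    have hd0 : (if 0 < k ∧ k % 2 ≠ 0 then 2 ^ (k / 2) * 2 else 2 ^ (k / 2)) =
        2 ^ ((k + 1) / 2) := by
      split_ifs with h
      · rw [← pow_succ]; congr 1; omega
      · congr 1; omega
    have hd1 : (if 0 < k ∧ k % 2 = 0 then 2 ^ ((k - 1) / 2) * 2 else 2 ^ ((k - 1) / 2)) =
        2 ^ ((k + 1 - 1) / 2) := by
      split_ifs with h
      · rw [← pow_succ]; congr 1; omega
      · congr 1; omega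
    have hpos : (1:Nat) ≤ 2 ^ k := Nat.one_le_two_pow
    have htot : 2 ^ k - 1 + 2 ^ k = 2 ^ (k + 1) - 1 := by
      have : 2 ^ (k+1) = 2 ^ k * 2 := pow_succ 2 k
      omega
    simp only [pvGoA, hd0, hd1, htot]
    split_ifs with h
    · -- 2^n - 1 = 2^(k+1) - 1  ⇒  n = k+1
      have hn : n = k + 1 := by
        have h2n : (2:Nat) ^ n = 2 ^ (k + 1) := by
          have : (1:Nat) ≤ 2 ^ n := Nat.one_le_two_pow
          have : (1:Nat) ≤ 2 ^ (k+1) := Nat.one_le_two_pow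
          omega
        exact Nat.pow_right_injective (by norm_num) h2n
      subst hn; rfl
    · have hk1 : k + 1 < n := by
        rcases Nat.lt_or_ge (k+1) n with h' | h'
        · exact h'
        · exfalso; have : n = k + 1 := by omega
          subst this; exact h rfl
      exact ih (k+1) n hk1 (by omega)

-- ===== VERDICT (by name: the statement is the Claim_ definition above) =====
theorem compute_nb_input_spaces_and_d_input_spec : Claim_equal_compute_nb_input_spaces_and_d_input := by
  intro x _ hpre
  obtain ⟨hne, hlen⟩ := hpre
  unfold Spec_compute_nb_input_spaces_and_d_input
  unfold compute_nb_input_spaces_and_d_input compute_nb_input_spaces_and_d_input_alt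
  set n := Nat.log2 (x.length + 1) with hn
  have hlpos : 1 ≤ x.length := by
    cases x with
    | nil => exact absurd rfl hne
    | cons a t => simp
  have hnpos : 1 ≤ n := by
    rcases Nat.eq_zero_or_pos n with h | h
    · exfalso; rw [h, pow_zero] at hlen; omega
    · exact h
  have hlen' : x.length = 2 ^ n - 1 := by rw [← hlen, Nat.add_sub_cancel]
  have hfuel : n ≤ x.length + 1 := by
    have h2 : n < 2 ^ n := Nat.lt_two_pow_self
    rw [← hlen] at h2
    omega
  rw [hlen']
  have := pvGoA_closedForm (x.length + 1) 0 n hnpos (by omega)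
  simpa [hlen'] using this
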